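-- pv_equiv track=rewrite | github.com/feldroy/airdocs | reference.py | _remove_args_section
-- ===== SOURCE A (Python) =====
-- def _remove_args_section(docstring: str) -> str:
--     """
--     Remove the 'Args:' section (and its contents) from a docstring string.
--     """
--     if not docstring:
--         return docstring
--
--     lines = docstring.splitlines()
--     cleaned = []
--     in_args_section = False
--
--     for line in lines:
--         stripped = line.strip()
--
--         # Detect start of Args section
--         if stripped.lower().startswith("args:"):
--             in_args_section = True
--             continue
--
--         if in_args_section:
--             # Stop skipping if we hit a non-indented line or a blank line
--             if stripped == "" or not line.startswith((" ", "\t")):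
--                 in_args_section = False
--                 cleaned.append(line)
--             # else: keep skipping arg lines
--         else:
--             cleaned.append(line)
--
--     return "\n".join(cleaned)
-- ===== SOURCE B (Python) =====
-- def _remove_args_section(docstring: str) -> str:
--     """
--     Remove the 'Args:' section (and its contents) from a docstring string.
--     Index-driven nested loop: an inner while skips the section body.
--     """
--     if not docstring:
--         return docstring
--
--     lines = docstring.splitlines()
--     out = []
--     i = 0
--     n = len(lines)
--     while i < n:
--         line = lines[i]
--         if line.strip().lower().startswith("args:"):
--             # skip the header, then skip indented non-blank body lines,
--             # stopping (without consuming) at a blank line, a non-indented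
--             # line, or another 'args:' header
--             i += 1
--             while i < n:
--                 nxt = lines[i]
--                 s = nxt.strip()
--                 if s == "" or not nxt.startswith((" ", "\t")) or s.lower().startswith("args:"):
--                     break
--                 i += 1
--             continue
--         out.append(line)
--         i += 1
--     return "\n".join(out)
-- ===== Notes on version B (the rewrite author's own statement) =====
-- stated objective: alternative
-- what changed: Replaces A's single pass with a boolean in_args_section flag by an index-driven outer loop with an inner while that skips an Args section body, stopping without consuming the terminating line.
import Mathlib
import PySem

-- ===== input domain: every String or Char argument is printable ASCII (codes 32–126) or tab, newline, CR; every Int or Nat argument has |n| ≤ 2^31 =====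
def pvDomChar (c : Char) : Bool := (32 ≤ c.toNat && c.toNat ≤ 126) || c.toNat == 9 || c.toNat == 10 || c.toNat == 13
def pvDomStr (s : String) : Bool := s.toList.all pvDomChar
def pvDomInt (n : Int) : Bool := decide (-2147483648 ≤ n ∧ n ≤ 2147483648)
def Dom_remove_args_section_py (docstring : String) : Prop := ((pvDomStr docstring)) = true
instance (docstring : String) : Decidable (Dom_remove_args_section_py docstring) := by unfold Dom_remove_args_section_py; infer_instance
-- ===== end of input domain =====

-- B replaces A's boolean-flag single pass by an index-driven nested loop: an inner skip loop
-- consumes the 'Args:' section body, the outer loop appends everything else (objective: alternative).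


-- ===== PORT A =====
-- the body of A's for-loop, state = (cleaned, in_args_section)
def pvStepA (st : List String × Bool) (line : String) : List String × Bool :=
  let stripped := PySem.Str.strip line
  if PySem.Str.startswith (PySem.Str.lower stripped) "args:" then
    (st.1, true)
  else if st.2 then
    if stripped = "" || !(PySem.Str.startswith line " " || PySem.Str.startswith line "\t") then
      (st.1 ++ [line], false)
    else
      (st.1, true)
  else
    (st.1 ++ [line], false)

def remove_args_section_py (docstring : String) : String :=
  if docstring = "" then docstring
  else
    PySem.Str.join "\n" (((PySem.Str.splitlines docstring).foldl pvStepA ([], false)).1)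

-- ===== PORT B =====
-- inner while-loop break condition: blank, non-indented, or another 'args:' header
def pvStopB (l : String) : Bool :=
  PySem.Str.strip l = "" || !(PySem.Str.startswith l " " || PySem.Str.startswith l "\t")
    || PySem.Str.startswith (PySem.Str.lower (PySem.Str.strip l)) "args:"

-- inner while loop: advance past section-body lines, keep the stopping line
def pvSkipB : List String → List String
  | [] => []
  | l :: rest => if pvStopB l then l :: rest else pvSkipB rest

theorem pvSkipB_length_le (l : List String) : (pvSkipB l).length ≤ l.length := by
  induction l with
  | nil => simp [pvSkipB]
  | cons x xs ih =>
    simp only [pvSkipB]; split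
    · simp
    · simp; omega

-- outer while loop over the remaining lines
def pvLoopB : List String → List String
  | [] => []
  | l :: rest =>
    if PySem.Str.startswith (PySem.Str.lower (PySem.Str.strip l)) "args:" then
      pvLoopB (pvSkipB rest)
    else
      l :: pvLoopB rest
termination_by ls => ls.length
decreasing_by
  · exact Nat.lt_succ_of_le (pvSkipB_length_le rest)
  · simp

def remove_args_section_py_alt (docstring : String) : String :=
  if docstring = "" then docstring
  else PySem.Str.join "\n" (pvLoopB (PySem.Str.splitlines docstring))

-- ===== PRECONDITION & SPEC =====
def Spec_remove_args_section_py (docstring : String) (out : String) : Prop := out = remove_args_section_py_alt docstring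
instance (docstring : String) (out : String) : Decidable (Spec_remove_args_section_py docstring out) := by unfold Spec_remove_args_section_py; infer_instance

-- ===== CLAIM (what is proved, stated in full; the proofs are below) =====
def Claim_equal_remove_args_section_py : Prop := ∀ (docstring : String), Dom_remove_args_section_py docstring → Spec_remove_args_section_py docstring (remove_args_section_py docstring)

-- ===== LEMMAS AND PROOFS =====
-- A's flag-fold equals B's nested loop; flag = true corresponds to first running the inner skip.
theorem pvFold_eq (lines : List String) : ∀ (acc : List String) (flag : Bool),
    ((lines.foldl pvStepA (acc, flag)).1
      = acc ++ (if flag then pvLoopB (pvSkipB lines) else pvLoopB lines)) := by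
  induction lines with
  | nil => intro acc flag; cases flag <;> simp [pvLoopB, pvSkipB]
  | cons l rest ih =>
    intro acc flag
    by_cases hh : PySem.Chars.startswith (PySem.Chars.lower (PySem.Chars.strip l.toList))
        ['a', 'r', 'g', 's', ':'] = true
    · have hstop : pvStopB l = true := by unfold pvStopB; simp [hh]
      cases flag <;>
        simp [List.foldl_cons, pvStepA, hh, pvLoopB, pvSkipB, hstop, ih]
    · by_cases hb : PySem.Str.strip l = "" ∨
          (PySem.Chars.startswith l.toList [' '] = false ∧
            PySem.Chars.startswith l.toList ['\t'] = false)
      · have hstop : pvStopB l = true := by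
          unfold pvStopB
          rcases hb with h | ⟨h1, h2⟩
          · simp [h]
          · simp [h1, h2]
        cases flag <;>
          simp [List.foldl_cons, pvStepA, hh, hb, pvLoopB, pvSkipB, hstop, ih]
      · have hb1 : ¬ PySem.Str.strip l = "" := fun h => hb (Or.inl h)
        have hb2 : (PySem.Chars.startswith l.toList [' ']
            || PySem.Chars.startswith l.toList ['\t']) = true := by
          cases hsp : PySem.Chars.startswith l.toList [' '] <;>
            cases hst : PySem.Chars.startswith l.toList ['\t'] <;> simp_all
        have hstop : pvStopB l = false := by
          unfold pvStopB
          simp [hb1, hb2, hh]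
        cases flag <;>
          simp [List.foldl_cons, pvStepA, hh, hb, pvLoopB, pvSkipB, hstop, ih]

-- ===== VERDICT (by name: the statement is the Claim_ definition above) =====
theorem remove_args_section_py_spec : Claim_equal_remove_args_section_py := by
  intro docstring _
  unfold Spec_remove_args_section_py remove_args_section_py remove_args_section_py_alt
  split
  · rfl
  · simpa using congrArg (PySem.Str.join "\n")
      (pvFold_eq (PySem.Str.splitlines docstring) [] false)
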